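-- pv_equiv track=rewrite | github.com/ChaBoxxHF/Licence-Informatique | Licence_2/S3/I33/tp2.py | valeur
-- ===== SOURCE A (Python) =====
-- def valeur(L,b):
--     p=1
--     s=0
--     i=0
--     while i<len(L):
--         s+=L[::-1][i]*p
--         p*=b
--         i+=1
--     return s
-- ===== SOURCE B (Python) =====
-- def valeur(L, b):
--     s = 0
--     for d in L:
--         s = s * b + d
--     return s
-- ===== Notes on version B (the rewrite author's own statement) =====
-- stated objective: idiomatic
-- what changed: Replaces the power-accumulator loop over the reversed list (A rebuilds L[::-1] every iteration) with Horner's method: a single forward fold s = s*b + d, no reversal and no power variable.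
import Mathlib
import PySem

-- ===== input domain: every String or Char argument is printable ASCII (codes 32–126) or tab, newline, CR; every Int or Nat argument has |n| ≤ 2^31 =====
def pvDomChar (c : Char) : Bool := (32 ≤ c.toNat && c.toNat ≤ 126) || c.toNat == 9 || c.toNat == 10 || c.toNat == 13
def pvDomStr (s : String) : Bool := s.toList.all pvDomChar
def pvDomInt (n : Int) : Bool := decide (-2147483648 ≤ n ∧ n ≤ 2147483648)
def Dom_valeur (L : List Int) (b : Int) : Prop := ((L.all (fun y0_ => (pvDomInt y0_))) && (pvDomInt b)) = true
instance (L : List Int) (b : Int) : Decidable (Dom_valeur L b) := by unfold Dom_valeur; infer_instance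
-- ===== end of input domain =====

-- B replaces A's power-accumulator loop over the reversed list with Horner's forward fold (idiomatic, one pass, no reversal).

-- ===== PORT A =====
-- A's while loop reads L[::-1][i] for i = 0,1,…: ported as the structural recursion
-- consuming the reversed list while carrying the same state (p, s).
def valeurLoopA (b : Int) (R : List Int) (p s : Int) : Int :=
  match R with
  | [] => s
  | d :: t => valeurLoopA b t (p * b) (s + d * p)

def valeur (L : List Int) (b : Int) : Int :=
  valeurLoopA b ((PySem.List.slice? L none none (-1)).getD []) 1 0
  -- slice? … (-1) = some L.reverse always (step ≠ 0), so getD never fires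

-- ===== PORT B =====
def valeur_alt (L : List Int) (b : Int) : Int :=
  L.foldl (fun s d => s * b + d) 0

-- ===== PRECONDITION & SPEC =====
def Spec_valeur (L : List Int) (b : Int) (out : Int) : Prop := out = valeur_alt L b
instance (L : List Int) (b : Int) (out : Int) : Decidable (Spec_valeur L b out) := by unfold Spec_valeur; infer_instance

-- ===== CLAIM (what is proved, stated in full; the proofs are below) =====
def Claim_equal_valeur : Prop := ∀ (L : List Int) (b : Int), Dom_valeur L b → Spec_valeur L b (valeur L b)

-- ===== LEMMAS AND PROOFS =====
theorem foldl_horner_append (b s : Int) (xs : List Int) (d : Int) :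
    (xs ++ [d]).foldl (fun s d => s * b + d) s
      = (xs.foldl (fun s d => s * b + d) s) * b + d := by
  simp [List.foldl_append]

theorem valeurLoopA_eq (b : Int) (R : List Int) (p s : Int) :
    valeurLoopA b R p s = s + p * (R.reverse.foldl (fun s d => s * b + d) 0) := by
  induction R generalizing p s with
  | nil => simp [valeurLoopA]
  | cons d t ih =>
    simp only [valeurLoopA, List.reverse_cons]
    rw [ih, foldl_horner_append]
    ring

-- ===== VERDICT (by name: the statement is the Claim_ definition above) =====
theorem valeur_spec : Claim_equal_valeur := by
  intro L b _
  unfold Spec_valeur valeur valeur_alt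
  rw [PySem.List.slice?_none_none_neg_one]
  simp only [Option.getD_some]
  rw [valeurLoopA_eq]
  simp
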